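-- pv_equiv track=rewrite | github.com/dung-max/CODEFORCES | khoangcachmaxmin.py | solve
-- ===== SOURCE A (Python) =====
-- from collections import deque
--
-- def bfs(n, adj):
--     dist = [-1] * (n + 1)
--     dist[1] = 0
--     queue = deque([1])
--     while queue:
--         u = queue.popleft()
--         for v in adj[u]:
--             if dist[v] == -1:
--                 dist[v] = dist[u] + 1
--                 queue.append(v)
--     return dist
--
-- def solve(n, m, k, product_types, roads):
--     adj = [[] for _ in range(n + 1)]
--     for u, v in roads:
--         adj[u].append(v)
--         adj[v].append(u)
--
--     dist_from_port = bfs(n, adj)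
--
--     max_dist = [0] * k
--     for i in range(1, n + 1):
--         product_type = product_types[i - 1]
--         max_dist[product_type - 1] = max(max_dist[product_type - 1], dist_from_port[i])
--
--     return max_dist
-- ===== SOURCE B (Python) =====
-- def solve(n, m, k, product_types, roads):
--     # Synchronous Bellman-Ford-style relaxation instead of a BFS queue:
--     # repeat (at most n rounds, stopping at a fixpoint): every cell takes
--     # min(own distance, 1 + min of neighbours' distances), with INF = n + 1;
--     # then aggregate per-type maxima, skipping unreached (INF) cells.
--     adj = [[] for _ in range(n + 1)]
--     for u, v in roads:
--         adj[u].append(v)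
--         adj[v].append(u)
--     INF = n + 1
--     dist = [INF] * (n + 1)
--     dist[1] = 0
--     for _ in range(n):
--         new = dist[:]
--         for v in range(n + 1):
--             best = dist[v]
--             for u in adj[v]:
--                 if dist[u] + 1 < best:
--                     best = dist[u] + 1
--             new[v] = best
--         if new == dist:
--             break
--         dist = new
--     max_dist = [0] * k
--     for v in range(1, n + 1):
--         d = dist[v]
--         if d < INF:
--             t = product_types[v - 1]
--             if d > max_dist[t - 1]:
--                 max_dist[t - 1] = d
--     return max_dist
-- ===== Notes on version B (the rewrite author's own statement) =====
-- stated objective: alternative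
-- what changed: Replaces the FIFO-queue BFS plus post-hoc max scan by synchronous Bellman-Ford-style relaxation rounds (every cell repeatedly takes 1 + the minimum of its neighbours' distances, INF = n + 1, stopping at a fixpoint) and an aggregation that skips unreached INF cells.
import Mathlib
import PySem

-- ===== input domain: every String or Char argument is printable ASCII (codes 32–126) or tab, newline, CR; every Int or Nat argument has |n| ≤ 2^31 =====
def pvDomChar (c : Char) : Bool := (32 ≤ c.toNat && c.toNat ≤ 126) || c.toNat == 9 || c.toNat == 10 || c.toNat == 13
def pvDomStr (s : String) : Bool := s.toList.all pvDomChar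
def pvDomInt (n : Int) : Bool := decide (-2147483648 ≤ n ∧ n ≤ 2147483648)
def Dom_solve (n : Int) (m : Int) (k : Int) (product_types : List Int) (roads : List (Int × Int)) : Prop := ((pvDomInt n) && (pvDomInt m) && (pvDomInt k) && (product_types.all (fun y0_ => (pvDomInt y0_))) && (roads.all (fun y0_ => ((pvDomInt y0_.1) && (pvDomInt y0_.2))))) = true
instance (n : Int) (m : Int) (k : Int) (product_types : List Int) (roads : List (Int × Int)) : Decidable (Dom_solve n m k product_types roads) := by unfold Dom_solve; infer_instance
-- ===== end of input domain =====

-- B replaces A's FIFO-queue BFS and post-hoc max scan by synchronous Bellman-Ford-style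
-- relaxation rounds (each node takes 1 + min of its neighbours' distances, INF = n,
-- stopping at a fixpoint) with an INF-skipping aggregation (objective: alternative).

-- ===== PORT A =====
-- Python list indexing with negative-index wraparound: xs[i] reads/writes cell
-- (len + i if i < 0 else i); exact on the in-range indices admitted by Pre_solve.
def pvEff (len : Nat) (i : Int) : Nat := (if i < 0 then (len : Int) + i else i).toNat
def pvIget (xs : List Int) (i : Int) : Int := xs.getD (pvEff xs.length i) (-2)
def pvIset (xs : List Int) (i : Int) (v : Int) : List Int := xs.set (pvEff xs.length i) v
def pvAget (xss : List (List Int)) (i : Int) : List Int := xss.getD (pvEff xss.length i) []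

-- 'adj = [[] for _ in range(n+1)]; for u, v in roads: adj[u].append(v); adj[v].append(u)'
-- (identical source lines in Source A and Source B, shared by both ports)
def buildAdj (n : Int) (roads : List (Int × Int)) : List (List Int) :=
  roads.foldl (fun adj uv =>
    let a1 := adj.set (pvEff adj.length uv.1) (pvAget adj uv.1 ++ [uv.2])
    a1.set (pvEff a1.length uv.2) (pvAget a1 uv.2 ++ [uv.1]))
    (List.replicate (n + 1).toNat [])

-- body of A's inner 'for v in adj[u]' over the (dist, queue-after-popleft) state
def bfsStepA (u : Int) (s : List Int × List Int) (v : Int) : List Int × List Int :=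
  if pvIget s.1 v = -1 then (pvIset s.1 v (pvIget s.1 u + 1), s.2 ++ [v]) else s

-- A's 'while queue' loop; fuel bounds the number of popleft steps (each pop either empties
-- the queue or converts -1 cells, so dist.length + 1 steps always suffice — proved below)
def bfsLoopA (adj : List (List Int)) : Nat → List Int → List Int → List Int
  | 0, dist, _ => dist
  | _ + 1, dist, [] => dist
  | f + 1, dist, u :: q =>
    let s := (pvAget adj u).foldl (bfsStepA u) (dist, q)
    bfsLoopA adj f s.1 s.2

def solve (n : Int) (m : Int) (k : Int) (product_types : List Int) (roads : List (Int × Int)) : List Int :=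
  let adj := buildAdj n roads
  let dist0 := pvIset (List.replicate (n + 1).toNat (-1)) 1 0
  let dist := bfsLoopA adj (dist0.length + 1) dist0 [1]
  (PySem.List.pyRange 1 (n + 1) 1).foldl (fun md i =>
      let pt := pvIget product_types (i - 1)
      pvIset md (pt - 1) (max (pvIget md (pt - 1)) (pvIget dist i)))
    (List.replicate k.toNat 0)

-- ===== PORT B =====
-- 'best = dist[v]; for u in adj[v]: if dist[u] + 1 < best: best = dist[u] + 1'
def relaxNode (adj : List (List Int)) (dist : List Int) (v : Int) : Int :=
  (pvAget adj v).foldl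
    (fun best u => if pvIget dist u + 1 < best then pvIget dist u + 1 else best)
    (pvIget dist v)

-- one round: 'new = dist[:]; for v in range(n + 1): … ; new[v] = best'
def bfRound (adj : List (List Int)) (n : Int) (dist : List Int) : List Int :=
  (PySem.List.pyRange 0 (n + 1) 1).foldl (fun nd v => pvIset nd v (relaxNode adj dist v)) dist

-- 'for _ in range(n): …; if new == dist: break; dist = new'
def bfRun (adj : List (List Int)) (n : Int) : Nat → List Int → List Int
  | 0, dist => dist
  | r + 1, dist =>
    let nd := bfRound adj n dist
    if nd = dist then dist else bfRun adj n r nd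

def solve_alt (n : Int) (m : Int) (k : Int) (product_types : List Int) (roads : List (Int × Int)) : List Int :=
  let adj := buildAdj n roads
  let dist0 := pvIset (List.replicate (n + 1).toNat (n + 1)) 1 0
  let dist := bfRun adj n n.toNat dist0
  (PySem.List.pyRange 1 (n + 1) 1).foldl (fun md v =>
      let d := pvIget dist v
      if d < n + 1 then
        let pt := pvIget product_types (v - 1)
        if d > pvIget md (pt - 1) then pvIset md (pt - 1) d else md
      else md)
    (List.replicate k.toNat 0)

-- ===== PRECONDITION & SPEC =====
-- Pre_ is exactly the closed-form domain on which the Python A returns normally: it excludes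
-- only the inputs where A's list indexing raises IndexError (n < 1, fewer product types than
-- cities, a road endpoint outside [-(n+1), n], a used product type outside [1-k, k]).
def Pre_solve (n : Int) (m : Int) (k : Int) (product_types : List Int) (roads : List (Int × Int)) : Prop :=
  1 ≤ n ∧ n ≤ (product_types.length : Int) ∧
  (∀ pt ∈ product_types.take n.toNat, 1 - k ≤ pt ∧ pt ≤ k) ∧
  (∀ uv ∈ roads, (-(n + 1) ≤ uv.1 ∧ uv.1 ≤ n) ∧ (-(n + 1) ≤ uv.2 ∧ uv.2 ≤ n))
instance (n : Int) (m : Int) (k : Int) (product_types : List Int) (roads : List (Int × Int)) : Decidable (Pre_solve n m k product_types roads) := by unfold Pre_solve; infer_instance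

def pvWitness_solve : Int × Int × Int × List Int × (List (Int × Int)) := (2, 1, 1, [1, 1], [(1, 2)])

def Spec_solve (n : Int) (m : Int) (k : Int) (product_types : List Int) (roads : List (Int × Int)) (out : List Int) : Prop := out = solve_alt n m k product_types roads
instance (n : Int) (m : Int) (k : Int) (product_types : List Int) (roads : List (Int × Int)) (out : List Int) : Decidable (Spec_solve n m k product_types roads out) := by unfold Spec_solve; infer_instance

-- ===== CLAIM (what is proved, stated in full; the proofs are below) =====
def Claim_equal_solve : Prop := ∀ (n : Int) (m : Int) (k : Int) (product_types : List Int) (roads : List (Int × Int)), Dom_solve n m k product_types roads → Pre_solve n m k product_types roads → Spec_solve n m k product_types roads (solve n m k product_types roads)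

-- ===== LEMMAS AND PROOFS =====

-- mapping A's -1 (unvisited) to B's INF = n
def relF (n x : Int) : Int := if x = -1 then n else x

-- number of still-unvisited cells
def cN (dist : List Int) : Nat := dist.countP (fun x => x == -1)

-- A-side reformulation used only in proofs: body of the inner 'for v in adj[u]' writing
-- an explicit level value w, whole-frontier expansion, and the level-synchronous loop.
def levelStepB (w : Int) (s : List Int × List Int) (v : Int) : List Int × List Int :=
  if pvIget s.1 v = -1 then (pvIset s.1 v w, s.2 ++ [v]) else s

def expandB (adj : List (List Int)) (w : Int) (s : List Int × List Int)
    (frontier : List Int) : List Int × List Int :=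
  frontier.foldl (fun s u => (pvAget adj u).foldl (levelStepB w) s) s

def levelLoopB (adj : List (List Int)) : Nat → Int → List Int → List Int → List Int
  | 0, _, dist, _ => dist
  | _ + 1, _, dist, [] => dist
  | f + 1, d, dist, u :: fr =>
    let s := expandB adj (d + 1) (dist, []) (u :: fr)
    levelLoopB adj f (d + 1) s.1 s.2

-- A's expansion of one whole level (what the queue processes between two level boundaries)
def expA (adj : List (List Int)) (dist : List Int) (cur : List Int) : List Int × List Int :=
  cur.foldl (fun s u => (pvAget adj u).foldl (bfsStepA u) s) (dist, [])

-- the state invariant tying A's queue to the level loop at a level boundary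
def InvM (d : Int) (dist q : List Int) : Prop :=
  (∀ x ∈ dist, -1 ≤ x) ∧ (∀ u ∈ q, pvIget dist u = d) ∧ 0 ≤ d

-- ---- basic cell lemmas ----
theorem length_pvIset (xs : List Int) (i : Int) (v : Int) : (pvIset xs i v).length = xs.length := by
  simp [pvIset]

theorem pvIget_pvIset_ne (xs : List Int) (i j v : Int)
    (h : pvEff xs.length i ≠ pvEff xs.length j) :
    pvIget (pvIset xs i v) j = pvIget xs j := by
  simp only [pvIget, pvIset, List.length_set, List.getD]
  rw [List.getElem?_set_ne h]

theorem pvIget_neg_one (xs : List Int) (i : Int) (h : pvIget xs i = -1) :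
    ∃ hlt : pvEff xs.length i < xs.length, xs[pvEff xs.length i] = -1 := by
  have hlt : pvEff xs.length i < xs.length := by
    by_contra hlt
    rw [pvIget, List.getD, List.getElem?_eq_none (by omega)] at h
    simp at h
  refine ⟨hlt, ?_⟩
  rw [pvIget, List.getD, List.getElem?_eq_getElem hlt] at h
  simpa using h

theorem pvEff_of_nonneg (len : Nat) (i : Int) (h : 0 ≤ i) : pvEff len i = i.toNat := by
  simp only [pvEff]
  rw [if_neg (by omega)]

theorem countP_set (xs : List Int) (p : Int → Bool) : ∀ (n : Nat) (w : Int), (hn : n < xs.length) →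
    (xs.set n w).countP p + (if p xs[n] then 1 else 0) = xs.countP p + (if p w then 1 else 0) := by
  induction xs with
  | nil => intro n w hn; simp at hn
  | cons a xs ih =>
    intro n w hn
    cases n with
    | zero =>
      simp only [List.set_cons_zero, List.countP_cons, List.getElem_cons_zero]
      split_ifs <;> omega
    | succ n =>
      have H := ih n w (by simpa using hn)
      simp only [List.set_cons_succ, List.countP_cons, List.getElem_cons_succ]
      split_ifs at H ⊢ <;> omega

theorem cN_pvIset (xs : List Int) (i w : Int) (h : pvIget xs i = -1) (hw : w ≠ -1) :
    cN (pvIset xs i w) + 1 = cN xs := by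
  obtain ⟨hlt, hx⟩ := pvIget_neg_one xs i h
  have := countP_set xs (fun x => x == -1) (pvEff xs.length i) w hlt
  simp only [hx, beq_iff_eq, hw, if_true, if_false] at this
  simpa [cN, pvIset] using this

-- ---- the level-step fold: counting, produced values, length (used by the A-bridge too) ----
theorem stepB_mono (w : Int) (l : List Int) : ∀ (s : List Int × List Int) (x : Int),
    pvIget s.1 x ≠ -1 → pvIget (l.foldl (levelStepB w) s).1 x = pvIget s.1 x := by
  induction l with
  | nil => intro s x hx; rfl
  | cons v l ih =>
    intro s x hx
    by_cases hv : pvIget s.1 v = -1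
    · have hne : pvEff s.1.length v ≠ pvEff s.1.length x := by
        intro he; apply hx; rw [← hv]; simp [pvIget, he]
      have h1 : pvIget (pvIset s.1 v w) x = pvIget s.1 x := pvIget_pvIset_ne _ _ _ _ hne
      simp only [List.foldl_cons, levelStepB, hv, if_true]
      rw [ih _ _ (by simpa [h1] using hx), h1]
    · simp only [List.foldl_cons, levelStepB, hv, if_false]
      exact ih _ _ hx

theorem stepB_count (w : Int) (hw : w ≠ -1) (l : List Int) : ∀ (s : List Int × List Int),
    cN (l.foldl (levelStepB w) s).1 + (l.foldl (levelStepB w) s).2.length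
      = cN s.1 + s.2.length := by
  induction l with
  | nil => intro s; rfl
  | cons v l ih =>
    intro s
    by_cases hv : pvIget s.1 v = -1
    · simp only [List.foldl_cons, levelStepB, hv, if_true]
      rw [ih]
      have := cN_pvIset s.1 v w hv hw
      simp only [List.length_append, List.length_cons, List.length_nil]
      omega
    · simp only [List.foldl_cons, levelStepB, hv, if_false]; exact ih s

theorem stepB_lb (w : Int) (hw : -1 ≤ w) (l : List Int) : ∀ (s : List Int × List Int),
    (∀ x ∈ s.1, -1 ≤ x) → ∀ x ∈ (l.foldl (levelStepB w) s).1, -1 ≤ x := by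
  induction l with
  | nil => intro s hs; exact hs
  | cons v l ih =>
    intro s hs
    by_cases hv : pvIget s.1 v = -1
    · simp only [List.foldl_cons, levelStepB, hv, if_true]
      refine ih _ ?_
      intro x hx
      rcases List.mem_or_eq_of_mem_set hx with h | h
      · exact hs x h
      · omega
    · simp only [List.foldl_cons, levelStepB, hv, if_false]; exact ih s hs

theorem stepB_out_val (w : Int) (hw : w ≠ -1) (l : List Int) : ∀ (s : List Int × List Int),
    (∀ v ∈ s.2, pvIget s.1 v = w) →
    ∀ v ∈ (l.foldl (levelStepB w) s).2, pvIget (l.foldl (levelStepB w) s).1 v = w := by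
  induction l with
  | nil => intro s hs; exact hs
  | cons a l ih =>
    intro s hs
    by_cases ha : pvIget s.1 a = -1
    · simp only [List.foldl_cons, levelStepB, ha, if_true]
      refine ih _ ?_
      intro v hv
      rcases List.mem_append.mp hv with h | h
      · have hne : pvEff s.1.length a ≠ pvEff s.1.length v := by
          intro he
          have h1 : pvIget s.1 v = w := hs v h
          have h2 : pvIget s.1 v = -1 := by rw [pvIget, ← he]; exact ha
          rw [h1] at h2; exact hw h2
        rw [pvIget_pvIset_ne _ _ _ _ hne]; exact hs v h
      · simp only [List.mem_singleton] at h
        subst h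
        obtain ⟨hlt, -⟩ := pvIget_neg_one s.1 v ha
        rw [pvIget, pvIset, List.getD, List.length_set, List.getElem?_set_self hlt]
        rfl
    · simp only [List.foldl_cons, levelStepB, ha, if_false]; exact ih s hs

theorem stepB_length (w : Int) (l : List Int) : ∀ (s : List Int × List Int),
    (l.foldl (levelStepB w) s).1.length = s.1.length := by
  induction l with
  | nil => intro s; rfl
  | cons a l ih =>
    intro s
    by_cases ha : pvIget s.1 a = -1 <;>
      simp only [List.foldl_cons, levelStepB, ha, if_true, if_false] <;>
      rw [ih] <;> simp [length_pvIset]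

-- expandB as one flat fold over the concatenated neighbour lists
theorem expandB_flat (adj : List (List Int)) (w : Int) (frontier : List Int) :
    ∀ (s : List Int × List Int),
    expandB adj w s frontier = (frontier.flatMap (fun u => pvAget adj u)).foldl (levelStepB w) s := by
  induction frontier with
  | nil => intro s; rfl
  | cons u fr ih =>
    intro s
    simp only [expandB, List.foldl_cons, List.flatMap_cons, List.foldl_append]
    exact ih _

-- ---- A's step fold factors its queue suffix ----
theorem stepA_factor (u : Int) (l : List Int) : ∀ (dist q : List Int),
    l.foldl (bfsStepA u) (dist, q)
      = ((l.foldl (bfsStepA u) (dist, [])).1, q ++ (l.foldl (bfsStepA u) (dist, [])).2) := by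
  induction l with
  | nil => intro dist q; simp
  | cons v l ih =>
    intro dist q
    by_cases hv : pvIget dist v = -1
    · simp only [List.foldl_cons, bfsStepA, hv, if_true, List.nil_append]
      rw [ih _ (q ++ [v]), ih _ [v]]
      simp
    · simp only [List.foldl_cons, bfsStepA, hv, if_false]
      exact ih dist q

theorem expA_factor (adj : List (List Int)) (cur : List Int) : ∀ (dist q : List Int),
    cur.foldl (fun s u => (pvAget adj u).foldl (bfsStepA u) s) (dist, q)
      = ((expA adj dist cur).1, q ++ (expA adj dist cur).2) := by
  induction cur with
  | nil => intro dist q; simp [expA]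
  | cons u cur ih =>
    intro dist q
    simp only [expA, List.foldl_cons]
    rw [stepA_factor u _ dist q, stepA_factor u _ dist []]
    rw [ih, ih ((pvAget adj u).foldl (bfsStepA u) (dist, [])).1
          ([] ++ ((pvAget adj u).foldl (bfsStepA u) (dist, [])).2)]
    simp

theorem bfsLoopA_nil (adj : List (List Int)) (f : Nat) (dist : List Int) :
    bfsLoopA adj f dist [] = dist := by cases f <;> rfl

theorem levelLoopB_nil (adj : List (List Int)) (f : Nat) (d : Int) (dist : List Int) :
    levelLoopB adj f d dist [] = dist := by cases f <;> rfl

-- A's FIFO loop processes the queue level by level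
theorem bfsLoopA_level (adj : List (List Int)) : ∀ (cur : List Int) (f : Nat) (dist acc : List Int),
    bfsLoopA adj (f + cur.length) dist (cur ++ acc)
      = bfsLoopA adj f (expA adj dist cur).1 (acc ++ (expA adj dist cur).2) := by
  intro cur
  induction cur with
  | nil => intro f dist acc; simp [expA]
  | cons u cur ih =>
    intro f dist acc
    have hunf : bfsLoopA adj (f + cur.length + 1) dist (u :: (cur ++ acc))
        = bfsLoopA adj (f + cur.length)
            ((pvAget adj u).foldl (bfsStepA u) (dist, cur ++ acc)).1
            ((pvAget adj u).foldl (bfsStepA u) (dist, cur ++ acc)).2 := rfl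
    set p := (pvAget adj u).foldl (bfsStepA u) (dist, []) with hp
    have h1 : (pvAget adj u).foldl (bfsStepA u) (dist, cur ++ acc) = (p.1, (cur ++ acc) ++ p.2) := by
      rw [stepA_factor]
    have h2 : expA adj dist (u :: cur) = ((expA adj p.1 cur).1, p.2 ++ (expA adj p.1 cur).2) := by
      simp only [expA, List.foldl_cons]
      rw [← hp]
      have := expA_factor adj cur p.1 p.2
      rw [show (p.1, p.2) = p from rfl] at this
      exact this
    simp only [List.length_cons, List.cons_append, show f + (cur.length + 1) = f + cur.length + 1 from rfl]
    rw [hunf, h1]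
    have : (cur ++ acc) ++ p.2 = cur ++ (acc ++ p.2) := by simp
    rw [this, ih f p.1 (acc ++ p.2), h2]
    simp

-- ---- one level of A equals one level of the level loop ----
theorem stepAB_inner (u d : Int) (hd : d ≠ -1) (l : List Int) : ∀ (s : List Int × List Int),
    pvIget s.1 u = d → l.foldl (bfsStepA u) s = l.foldl (levelStepB (d + 1)) s := by
  induction l with
  | nil => intro s _; rfl
  | cons v l ih =>
    intro s hu
    by_cases hv : pvIget s.1 v = -1
    · have hne : pvEff s.1.length v ≠ pvEff s.1.length u := by
        intro he
        have h2 : pvIget s.1 v = d := by rw [pvIget, he]; exact hu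
        rw [hv] at h2; exact hd h2.symm
      simp only [List.foldl_cons, bfsStepA, levelStepB, hv, if_true, hu]
      exact ih _ (by rw [pvIget_pvIset_ne _ _ _ _ hne]; exact hu)
    · simp only [List.foldl_cons, bfsStepA, levelStepB, hv, if_false]
      exact ih _ hu

theorem expAB (adj : List (List Int)) (d : Int) (hd : 0 ≤ d) (cur : List Int) :
    ∀ (s : List Int × List Int),
    (∀ u ∈ cur, pvIget s.1 u = d) →
    cur.foldl (fun s u => (pvAget adj u).foldl (bfsStepA u) s) s = expandB adj (d + 1) s cur := by
  induction cur with
  | nil => intro s _; rfl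
  | cons u cur ih =>
    intro s hval
    have hd' : d ≠ -1 := by omega
    have h1 : (pvAget adj u).foldl (bfsStepA u) s = (pvAget adj u).foldl (levelStepB (d + 1)) s :=
      stepAB_inner u d hd' _ s (hval u (by simp))
    simp only [List.foldl_cons, expandB]
    rw [h1]
    refine ih ((pvAget adj u).foldl (levelStepB (d + 1)) s) ?_
    intro v hv
    rw [stepB_mono (d + 1) _ s v (by rw [hval v (by simp [hv])]; omega)]
    exact hval v (by simp [hv])

-- ---- the first bridge: A's queue BFS = the level-synchronous loop ----
theorem bridge (adj : List (List Int)) :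
    ∀ (fA : Nat) (fB : Nat) (d : Int) (dist q : List Int),
    InvM d dist q → cN dist + q.length ≤ fA → cN dist + 1 ≤ fB →
    bfsLoopA adj fA dist q = levelLoopB adj fB d dist q := by
  intro fA
  induction fA using Nat.strong_induction_on with
  | _ fA ih =>
    intro fB d dist q hinv hfA hfB
    obtain ⟨hlb, hq, hd0⟩ := hinv
    match q with
    | [] => rw [bfsLoopA_nil, levelLoopB_nil]
    | u :: q' =>
      have hw : d + 1 ≠ -1 := by omega
      set e := expA adj dist (u :: q') with he
      have heB : e = expandB adj (d + 1) (dist, []) (u :: q') := by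
        rw [he, expA]
        exact expAB adj d hd0 (u :: q') (dist, []) (fun v hv => hq v hv)
      have hflat : e = ((u :: q').flatMap (fun v => pvAget adj v)).foldl (levelStepB (d + 1)) (dist, []) := by
        rw [heB, expandB_flat]
      have hcount : cN e.1 + e.2.length = cN dist := by
        have := stepB_count (d + 1) hw ((u :: q').flatMap (fun v => pvAget adj v)) (dist, [])
        rw [← hflat] at this
        simpa using this
      have hlc : (u :: q').length = q'.length + 1 := rfl
      have hlen : (u :: q').length ≤ fA := le_trans (by omega) hfA
      have hfA' : fA = (fA - (u :: q').length) + (u :: q').length := by omega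
      have hA : bfsLoopA adj fA dist (u :: q')
          = bfsLoopA adj (fA - (u :: q').length) e.1 e.2 := by
        have H := bfsLoopA_level adj (u :: q') (fA - (u :: q').length) dist []
        rw [List.append_nil, List.nil_append, ← hfA', ← he] at H
        exact H
      have hfB1 : ∃ fB', fB = fB' + 1 := ⟨fB - 1, by omega⟩
      obtain ⟨fB', rfl⟩ := hfB1
      have hB : levelLoopB adj (fB' + 1) d dist (u :: q')
          = levelLoopB adj fB' (d + 1) e.1 e.2 := by
        show levelLoopB adj fB' (d + 1) (expandB adj (d + 1) (dist, []) (u :: q')).1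
              (expandB adj (d + 1) (dist, []) (u :: q')).2
            = levelLoopB adj fB' (d + 1) e.1 e.2
        rw [← heB]
      rw [hA, hB]
      by_cases he2 : e.2 = []
      · rw [he2, bfsLoopA_nil, levelLoopB_nil]
      · have hlbe : ∀ x ∈ e.1, -1 ≤ x := by
          rw [hflat]
          exact stepB_lb (d + 1) (by omega) _ (dist, []) hlb
        have hvals : ∀ x ∈ e.2, pvIget e.1 x = d + 1 := by
          rw [hflat]
          exact stepB_out_val (d + 1) hw _ (dist, []) (by intro v hv; simp at hv)
        have hinv' : InvM (d + 1) e.1 e.2 := ⟨hlbe, hvals, by omega⟩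
        have hstep : fA - (u :: q').length < fA := by
          simp only [List.length_cons]; omega
        have hpos : 1 ≤ e.2.length := List.length_pos_iff.mpr he2
        refine ih _ hstep fB' (d + 1) e.1 e.2 hinv' (by omega) (by omega)

theorem levelLoopB_length (adj : List (List Int)) : ∀ (f : Nat) (d : Int) (dist q : List Int),
    (levelLoopB adj f d dist q).length = dist.length := by
  intro f
  induction f with
  | zero => intro d dist q; rfl
  | succ f ih =>
    intro d dist q
    match q with
    | [] => rfl
    | u :: fr =>
      show (levelLoopB adj f (d + 1) _ _).length = _
      rw [ih, expandB_flat]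
      exact stepB_length _ _ (dist, [])

-- ---- cell-level view: indices after Python's negative-index normalization ----
def cget (dist : List Int) (c : Nat) : Int := dist.getD c (-2)
def cadj (adj : List (List Int)) (c : Nat) : List Int := adj.getD c []

theorem pvIget_eq_cget (dist : List Int) (x : Int) :
    pvIget dist x = cget dist (pvEff dist.length x) := rfl

theorem pvAget_eq_cadj (adj : List (List Int)) (u : Int) :
    pvAget adj u = cadj adj (pvEff adj.length u) := rfl

theorem pvEff_natCast (len c : Nat) : pvEff len (c : Int) = c := by
  rw [pvEff_of_nonneg _ _ (Int.natCast_nonneg c), Int.toNat_natCast]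

theorem cget_pvIset_ne (dist : List Int) (a w : Int) (c : Nat)
    (h : pvEff dist.length a ≠ c) : cget (pvIset dist a w) c = cget dist c := by
  simp only [cget, pvIset, List.getD]
  rw [List.getElem?_set_ne h]

theorem cget_pvIset_self (dist : List Int) (a w : Int)
    (h : pvEff dist.length a < dist.length) :
    cget (pvIset dist a w) (pvEff dist.length a) = w := by
  simp only [cget, pvIset, List.getD]
  rw [List.getElem?_set_self h]
  rfl

theorem cget_pvIset_natCast (nd : List Int) (c : Nat) (w : Int) (h : c < nd.length) :
    cget (pvIset nd (c : Int) w) c = w := by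
  rw [pvIset, pvEff_natCast]
  simp only [cget, List.getD]
  rw [List.getElem?_set_self h]
  rfl

theorem cget_eq_getElem (dist : List Int) (c : Nat) (h : c < dist.length) :
    cget dist c = dist[c] := by
  rw [cget, List.getD, List.getElem?_eq_getElem h]
  rfl

theorem cget_map (f : Int → Int) (dist : List Int) (c : Nat) (h : c < dist.length) :
    cget (dist.map f) c = f (cget dist c) := by
  rw [cget_eq_getElem _ _ (by simpa using h), cget_eq_getElem _ _ h, List.getElem_map]

theorem list_eq_of_cget (xs ys : List Int) (hlen : xs.length = ys.length)
    (h : ∀ c : Nat, c < xs.length → cget xs c = cget ys c) : xs = ys := by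
  apply List.ext_getElem hlen
  intro i h1 h2
  have hi := h i h1
  rw [cget_eq_getElem _ _ h1, cget_eq_getElem _ _ h2] at hi
  exact hi

theorem cN_pos_cell (dist : List Int) (c : Nat) (hc : c < dist.length)
    (h : cget dist c = -1) : 1 ≤ cN dist := by
  rw [cget_eq_getElem _ _ hc] at h
  have hmem : (-1 : Int) ∈ dist := h ▸ List.getElem_mem hc
  have : 0 < dist.countP (fun x => x == -1) := List.countP_pos_iff.mpr ⟨-1, hmem, by simp⟩
  simp only [cN]
  omega

-- every label admitted by Pre_ normalizes to a cell 0..n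
theorem pvEff_lt_range (n a : Int) (_hn : 1 ≤ n) (h1 : -(n + 1) ≤ a) (h2 : a ≤ n) :
    pvEff (n + 1).toNat a < (n + 1).toNat := by
  simp only [pvEff]
  split <;> omega

-- ---- adjacency-list properties (cell level) ----
def AdjInv (n : Int) (adj : List (List Int)) : Prop :=
  adj.length = (n + 1).toNat ∧
  (∀ c : Nat, ∀ v ∈ cadj adj c, pvEff (n + 1).toNat v < (n + 1).toNat) ∧
  (∀ c d : Nat, c < (n + 1).toNat → d < (n + 1).toNat →
    ((∃ v ∈ cadj adj c, pvEff (n + 1).toNat v = d) ↔ (∃ u ∈ cadj adj d, pvEff (n + 1).toNat u = c)))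

theorem cadj_set (xss : List (List Int)) (j : Nat) (l : List Int) (c : Nat) :
    cadj (xss.set j l) c = if j = c ∧ j < xss.length then l else cadj xss c := by
  simp only [cadj, List.getD]
  by_cases hlt : j < xss.length
  · by_cases he : j = c
    · rw [if_pos ⟨he, hlt⟩, ← he, List.getElem?_set_self hlt]
      rfl
    · rw [if_neg (by tauto), List.getElem?_set_ne he]
  · rw [if_neg (by tauto), List.set_eq_of_length_le (by omega)]

theorem cadj_replicate (N : Nat) (c : Nat) :
    cadj (List.replicate N ([] : List Int)) c = [] := by
  simp only [cadj, List.getD, List.getElem?_replicate]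
  split <;> rfl

theorem buildAdj_inv (n : Int) (roads : List (Int × Int)) (hn : 1 ≤ n)
    (hr : ∀ uv ∈ roads, (-(n + 1) ≤ uv.1 ∧ uv.1 ≤ n) ∧ (-(n + 1) ≤ uv.2 ∧ uv.2 ≤ n)) :
    AdjInv n (buildAdj n roads) := by
  have hstep : ∀ (adj : List (List Int)) (a b : Int), AdjInv n adj →
      -(n + 1) ≤ a → a ≤ n → -(n + 1) ≤ b → b ≤ n →
      AdjInv n ((adj.set (pvEff adj.length a) (pvAget adj a ++ [b])).set
        (pvEff (adj.set (pvEff adj.length a) (pvAget adj a ++ [b])).length b)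
        (pvAget (adj.set (pvEff adj.length a) (pvAget adj a ++ [b])) b ++ [a])) := by
    intro adj a b hI ha1 ha2 hb1 hb2
    obtain ⟨hlen, hbound, hsym⟩ := hI
    have hca : pvEff (n + 1).toNat a < (n + 1).toNat := pvEff_lt_range n a hn ha1 ha2
    have hcb : pvEff (n + 1).toNat b < (n + 1).toNat := pvEff_lt_range n b hn hb1 hb2
    have hLa : pvEff adj.length a = pvEff (n + 1).toNat a := by rw [hlen]
    have hLb : pvEff adj.length b = pvEff (n + 1).toNat b := by rw [hlen]
    set ca := pvEff (n + 1).toNat a with hca'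
    set cb := pvEff (n + 1).toNat b with hcb'
    have hAa : pvAget adj a = cadj adj ca := by rw [pvAget_eq_cadj, hLa]
    set mid := adj.set (pvEff adj.length a) (pvAget adj a ++ [b]) with hmid
    have hmlen : mid.length = adj.length := by rw [hmid]; exact List.length_set ..
    have hmidc : ∀ c : Nat, cadj mid c = if ca = c then cadj adj ca ++ [b] else cadj adj c := by
      intro c
      rw [hmid, hAa, hLa, cadj_set]
      by_cases he : ca = c
      · rw [if_pos ⟨he, by omega⟩, if_pos he]
      · rw [if_neg (by tauto), if_neg he]
    have hAb : pvAget mid b = cadj mid cb := by rw [pvAget_eq_cadj, hmlen, hLb]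
    set fin := mid.set (pvEff mid.length b) (pvAget mid b ++ [a]) with hfin
    have hflen : fin.length = adj.length := by rw [hfin, List.length_set, hmlen]
    have hfinc : ∀ c : Nat, cadj fin c = if cb = c then cadj mid cb ++ [a] else cadj mid c := by
      intro c
      rw [hfin, hAb, hmlen, hLb, cadj_set]
      by_cases he : cb = c
      · rw [if_pos ⟨he, by omega⟩, if_pos he]
      · rw [if_neg (by tauto), if_neg he]
    have hmem : ∀ (c : Nat) (x : Int), x ∈ cadj fin c ↔ x ∈ cadj adj c ∨
        (c = ca ∧ x = b) ∨ (c = cb ∧ x = a) := by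
      intro c x
      rw [hfinc c]
      by_cases hcbc : cb = c
      · rw [if_pos hcbc, hmidc cb]
        have h2 : c = cb := hcbc.symm
        by_cases hcab : ca = cb
        · rw [if_pos hcab, hcab.trans hcbc]
          have h1 : c = ca := (hcab.trans hcbc).symm
          simp only [List.mem_append, List.mem_singleton]
          constructor
          · rintro ((h | h) | h) <;> tauto
          · rintro (h | ⟨-, h⟩ | ⟨-, h⟩) <;> tauto
        · rw [if_neg hcab, hcbc]
          have h1 : c ≠ ca := fun h => hcab ((h ▸ h2 : ca = cb))
          simp only [List.mem_append, List.mem_singleton]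
          constructor
          · rintro (h | h) <;> tauto
          · rintro (h | ⟨hc, -⟩ | ⟨-, h⟩) <;> tauto
      · rw [if_neg hcbc, hmidc c]
        by_cases hcac : ca = c
        · rw [if_pos hcac, hcac]
          have h1 : c = ca := hcac.symm
          have h2 : c ≠ cb := fun h => hcbc h.symm
          simp only [List.mem_append, List.mem_singleton]
          constructor
          · rintro (h | h) <;> tauto
          · rintro (h | ⟨-, h⟩ | ⟨hc, -⟩) <;> tauto
        · rw [if_neg hcac]
          have h1 : c ≠ ca := fun h => hcac h.symm
          have h2 : c ≠ cb := fun h => hcbc h.symm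
          constructor
          · tauto
          · rintro (h | ⟨hc, -⟩ | ⟨hc, -⟩) <;> tauto
    refine ⟨by rw [hflen, hlen], ?_, ?_⟩
    · intro c v hv
      rw [hmem] at hv
      rcases hv with h | ⟨-, rfl⟩ | ⟨-, rfl⟩
      · exact hbound c v h
      · exact hcb
      · exact hca
    · intro c d hc hd
      constructor
      · rintro ⟨v, hv, hvd⟩
        rw [hmem] at hv
        rcases hv with h | ⟨rfl, rfl⟩ | ⟨rfl, rfl⟩
        · obtain ⟨u, hu, huc⟩ := (hsym c d hc hd).mp ⟨v, h, hvd⟩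
          exact ⟨u, by rw [hmem]; exact Or.inl hu, huc⟩
        · exact ⟨a, by rw [hmem]; exact Or.inr (Or.inr ⟨hvd.symm, rfl⟩), rfl⟩
        · exact ⟨b, by rw [hmem]; exact Or.inr (Or.inl ⟨hvd.symm, rfl⟩), rfl⟩
      · rintro ⟨v, hv, hvd⟩
        rw [hmem] at hv
        rcases hv with h | ⟨rfl, rfl⟩ | ⟨rfl, rfl⟩
        · obtain ⟨u, hu, huc⟩ := (hsym d c hd hc).mp ⟨v, h, hvd⟩
          exact ⟨u, by rw [hmem]; exact Or.inl hu, huc⟩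
        · exact ⟨a, by rw [hmem]; exact Or.inr (Or.inr ⟨hvd.symm, rfl⟩), rfl⟩
        · exact ⟨b, by rw [hmem]; exact Or.inr (Or.inl ⟨hvd.symm, rfl⟩), rfl⟩
  have hinit : AdjInv n (List.replicate (n + 1).toNat ([] : List Int)) := by
    refine ⟨by simp, ?_, ?_⟩
    · intro c v hv
      rw [cadj_replicate] at hv
      simp at hv
    · intro c d _ _
      rw [cadj_replicate, cadj_replicate]
      simp
  have hfold : ∀ (rds : List (Int × Int)) (adj : List (List Int)), AdjInv n adj →
      (∀ uv ∈ rds, (-(n + 1) ≤ uv.1 ∧ uv.1 ≤ n) ∧ (-(n + 1) ≤ uv.2 ∧ uv.2 ≤ n)) →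
      AdjInv n (rds.foldl (fun adj uv =>
        let a1 := adj.set (pvEff adj.length uv.1) (pvAget adj uv.1 ++ [uv.2])
        a1.set (pvEff a1.length uv.2) (pvAget a1 uv.2 ++ [uv.1])) adj) := by
    intro rds
    induction rds with
    | nil => intro adj h _; exact h
    | cons uv rds ih =>
      intro adj h hb
      simp only [List.foldl_cons]
      exact ih _
        (hstep adj uv.1 uv.2 h (hb uv (by simp)).1.1 (hb uv (by simp)).1.2
          (hb uv (by simp)).2.1 (hb uv (by simp)).2.2)
        (fun p hp => hb p (by simp [hp]))
  rw [buildAdj]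
  exact hfold roads _ hinit hr

-- ---- characterization of a whole-frontier expansion (cell level) ----
theorem expChar (N : Nat) (w : Int) (hw : 1 ≤ w) :
    ∀ (L : List Int) (dist q : List Int),
    dist.length = N →
    (∀ x ∈ L, pvEff N x < N) →
    (∀ c : Nat, c < N →
        cget (L.foldl (levelStepB w) (dist, q)).1 c
          = if cget dist c = -1 ∧ (∃ y ∈ L, pvEff N y = c) then w else cget dist c) ∧
    (∀ v ∈ (L.foldl (levelStepB w) (dist, q)).2, v ∈ q ∨ v ∈ L) ∧
    (∀ c : Nat, c < N →
        ((∃ y ∈ (L.foldl (levelStepB w) (dist, q)).2, pvEff N y = c)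
          ↔ (∃ y ∈ q, pvEff N y = c) ∨ (cget dist c = -1 ∧ ∃ y ∈ L, pvEff N y = c))) := by
  intro L
  induction L with
  | nil =>
    intro dist q hlen hb
    exact ⟨fun c _ => by simp, fun v hv => Or.inl hv, fun c _ => by simp⟩
  | cons a L ih =>
    intro dist q hlen hb
    have hca : pvEff N a < N := hb a (by simp)
    have hbL : ∀ x ∈ L, pvEff N x < N := fun x hx => hb x (by simp [hx])
    have hLa : pvEff dist.length a = pvEff N a := by rw [hlen]
    have hIa : pvIget dist a = cget dist (pvEff N a) := by rw [pvIget_eq_cget, hLa]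
    simp only [List.foldl_cons]
    by_cases hva : pvIget dist a = -1
    · have hstep : levelStepB w (dist, q) a = (pvIset dist a w, q ++ [a]) := by
        simp [levelStepB, hva]
      rw [hstep]
      have hlen1 : (pvIset dist a w).length = N := by rw [length_pvIset, hlen]
      obtain ⟨c1, c3, c4⟩ := ih (pvIset dist a w) (q ++ [a]) hlen1 hbL
      have hget : ∀ c : Nat, cget (pvIset dist a w) c
          = if c = pvEff N a then w else cget dist c := by
        intro c
        by_cases hc : c = pvEff N a
        · rw [if_pos hc, hc, ← hLa, cget_pvIset_self _ _ _ (by rw [hLa, hlen]; exact hca)]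
        · rw [if_neg hc, cget_pvIset_ne _ _ _ _ (by rw [hLa]; exact fun h => hc h.symm)]
      rw [hIa] at hva
      refine ⟨?_, ?_, ?_⟩
      · intro c hc
        rw [c1 c hc, hget c]
        by_cases hc' : c = pvEff N a
        · subst hc'
          have hEx : cget dist (pvEff N a) = -1 ∧ ∃ y ∈ a :: L, pvEff N y = pvEff N a :=
            ⟨hva, a, by simp, rfl⟩
          rw [if_pos rfl,
            if_neg (show ¬(w = -1 ∧ ∃ y ∈ L, pvEff N y = pvEff N a) from
              fun h => absurd h.1 (by omega)),
            if_pos hEx]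
        · rw [if_neg hc']
          by_cases hxd : cget dist c = -1
          · simp only [hxd, true_and]
            have : (∃ y ∈ a :: L, pvEff N y = c) ↔ (∃ y ∈ L, pvEff N y = c) := by
              simp only [List.mem_cons]
              constructor
              · rintro ⟨y, rfl | hy, hyc⟩
                · exact absurd hyc.symm hc'
                · exact ⟨y, hy, hyc⟩
              · rintro ⟨y, hy, hyc⟩; exact ⟨y, Or.inr hy, hyc⟩
            simp only [this]
          · simp [hxd]
      · intro v hv
        rcases c3 v hv with h | h
        · rcases List.mem_append.mp h with h' | h'
          · exact Or.inl h'
          · simp only [List.mem_singleton] at h'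
            exact Or.inr (by simp [h'])
        · exact Or.inr (by simp [h])
      · intro c hc
        rw [c4 c hc, hget c]
        by_cases hc' : c = pvEff N a
        · subst hc'
          constructor
          · intro _
            exact Or.inr ⟨hva, ⟨a, by simp, rfl⟩⟩
          · intro _; exact Or.inl ⟨a, by simp, rfl⟩
        · rw [if_neg hc']
          have hqa : (∃ y ∈ q ++ [a], pvEff N y = c) ↔ (∃ y ∈ q, pvEff N y = c) := by
            constructor
            · rintro ⟨y, hy, hyc⟩
              rcases List.mem_append.mp hy with h' | h'
              · exact ⟨y, h', hyc⟩
              · simp only [List.mem_singleton] at h'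
                subst h'
                exact absurd hyc.symm hc'
            · rintro ⟨y, hy, hyc⟩; exact ⟨y, List.mem_append.mpr (Or.inl hy), hyc⟩
          have hLc : (∃ y ∈ a :: L, pvEff N y = c) ↔ (∃ y ∈ L, pvEff N y = c) := by
            simp only [List.mem_cons]
            constructor
            · rintro ⟨y, rfl | hy, hyc⟩
              · exact absurd hyc.symm hc'
              · exact ⟨y, hy, hyc⟩
            · rintro ⟨y, hy, hyc⟩; exact ⟨y, Or.inr hy, hyc⟩
          rw [hqa, hLc]
    · have hstep : levelStepB w (dist, q) a = (dist, q) := by simp [levelStepB, hva]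
      rw [hstep]
      obtain ⟨c1, c3, c4⟩ := ih dist q hlen hbL
      rw [hIa] at hva
      have hLcond : ∀ c : Nat, (cget dist c = -1 ∧ ∃ y ∈ a :: L, pvEff N y = c)
          ↔ (cget dist c = -1 ∧ ∃ y ∈ L, pvEff N y = c) := by
        intro c
        constructor
        · rintro ⟨hd, y, hy, hyc⟩
          rcases List.mem_cons.mp hy with rfl | hy'
          · rw [← hyc] at hd
            exact absurd hd hva
          · exact ⟨hd, y, hy', hyc⟩
        · rintro ⟨hd, y, hy, hyc⟩
          exact ⟨hd, y, by simp [hy], hyc⟩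
      refine ⟨?_, fun v hv => (c3 v hv).imp id (fun h => by simp [h]), ?_⟩
      · intro c hc
        rw [c1 c hc]
        by_cases hcond : cget dist c = -1 ∧ ∃ y ∈ L, pvEff N y = c
        · rw [if_pos hcond, if_pos ((hLcond c).mpr hcond)]
        · rw [if_neg hcond, if_neg (fun h => hcond ((hLcond c).mp h))]
      · intro c hc
        rw [c4 c hc, hLcond c]

-- ---- characterization of one relaxation round (all cells 0..n) ----
theorem roundChar (adj : List (List Int)) (n : Int) (dist : List Int) (hn : 1 ≤ n)
    (hlen : dist.length = (n + 1).toNat) :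
    (bfRound adj n dist).length = dist.length ∧
    (∀ c : Nat, c < (n + 1).toNat →
        cget (bfRound adj n dist) c = relaxNode adj dist (c : Int)) := by
  have haux : ∀ (l : List Int) (nd : List Int), nd.length = dist.length →
      (∀ x ∈ l, 0 ≤ x ∧ x < n + 1) →
      (l.foldl (fun nd v => pvIset nd v (relaxNode adj dist v)) nd).length = nd.length ∧
      (∀ c : Nat, c < (n + 1).toNat →
          cget (l.foldl (fun nd v => pvIset nd v (relaxNode adj dist v)) nd) c
            = if (c : Int) ∈ l then relaxNode adj dist (c : Int) else cget nd c) := by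
    intro l
    induction l with
    | nil => intro nd _ _; exact ⟨rfl, fun c _ => by simp⟩
    | cons a l ih =>
      intro nd hndlen hb
      have ha1 : 0 ≤ a := (hb a (by simp)).1
      have ha2 : a < n + 1 := (hb a (by simp)).2
      have heffa : pvEff nd.length a = a.toNat := pvEff_of_nonneg _ _ ha1
      have halt : a.toNat < nd.length := by rw [hndlen, hlen]; omega
      simp only [List.foldl_cons]
      have hnd1len : (pvIset nd a (relaxNode adj dist a)).length = dist.length := by
        rw [length_pvIset, hndlen]
      obtain ⟨d1, d3⟩ :=
        ih (pvIset nd a (relaxNode adj dist a)) hnd1len (fun x hx => hb x (by simp [hx]))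
      refine ⟨by rw [d1, length_pvIset], ?_⟩
      intro c hc
      rw [d3 c hc]
      by_cases hcl : (c : Int) ∈ l
      · rw [if_pos hcl, if_pos (by simp [hcl])]
      · by_cases hca : (c : Int) = a
        · rw [if_neg hcl, if_pos (by simp [hca]), ← hca,
            cget_pvIset_natCast nd c _ (by rw [hndlen, hlen]; omega)]
        · rw [if_neg hcl, if_neg (by simp [hca, hcl]),
            cget_pvIset_ne _ _ _ _ (by rw [heffa]; omega)]
  obtain ⟨e1, e3⟩ := haux (PySem.List.pyRange 0 (n + 1) 1) dist rfl
    (fun x hx => by rw [PySem.List.mem_pyRange_one] at hx; omega)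
  refine ⟨e1, fun c hc => ?_⟩
  rw [bfRound] at *
  rw [e3 c hc, if_pos (PySem.List.mem_pyRange_one.mpr ⟨by omega, by omega⟩)]

-- ---- fold-min lemmas for relaxNode ----
theorem relax_fold_const (dist : List Int) (L : List Int) (b : Int)
    (h : ∀ u ∈ L, b ≤ pvIget dist u + 1) :
    L.foldl (fun best u => if pvIget dist u + 1 < best then pvIget dist u + 1 else best) b = b := by
  induction L with
  | nil => rfl
  | cons a L ih =>
    have ha := h a (by simp)
    simp only [List.foldl_cons]
    rw [if_neg (by omega)]
    exact ih (fun u hu => h u (by simp [hu]))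

theorem relax_fold_min (dist : List Int) (L : List Int) (b m : Int)
    (hall : ∀ u ∈ L, m ≤ pvIget dist u + 1) (hmb : m ≤ b)
    (hex : ∃ u ∈ L, pvIget dist u + 1 = m) :
    L.foldl (fun best u => if pvIget dist u + 1 < best then pvIget dist u + 1 else best) b = m := by
  have hlb : ∀ (L' : List Int) (b' : Int), (∀ u ∈ L', m ≤ pvIget dist u + 1) → m ≤ b' →
      m ≤ L'.foldl (fun best u => if pvIget dist u + 1 < best then pvIget dist u + 1 else best) b' := by
    intro L'
    induction L' with
    | nil => intro b' _ h; exact h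
    | cons a L' ih =>
      intro b' hall' hmb'
      simp only [List.foldl_cons]
      by_cases h : pvIget dist a + 1 < b'
      · rw [if_pos h]
        exact ih _ (fun u hu => hall' u (by simp [hu])) (hall' a (by simp))
      · rw [if_neg h]
        exact ih _ (fun u hu => hall' u (by simp [hu])) hmb'
  have hub : ∀ (L' : List Int) (b' : Int),
      L'.foldl (fun best u => if pvIget dist u + 1 < best then pvIget dist u + 1 else best) b' ≤ b' := by
    intro L'
    induction L' with
    | nil => intro b'; exact le_refl b'
    | cons a L' ih =>
      intro b'
      simp only [List.foldl_cons]
      by_cases h : pvIget dist a + 1 < b'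
      · rw [if_pos h]; exact le_trans (ih _) (by omega)
      · rw [if_neg h]; exact ih b'
  obtain ⟨u0, hu0, hfu0⟩ := hex
  have hle : ∀ (L' : List Int) (b' : Int), u0 ∈ L' →
      L'.foldl (fun best u => if pvIget dist u + 1 < best then pvIget dist u + 1 else best) b' ≤ m := by
    intro L'
    induction L' with
    | nil => intro b' h; simp at h
    | cons a L' ih =>
      intro b' h
      simp only [List.foldl_cons]
      rcases List.mem_cons.mp h with rfl | h'
      · by_cases hc : pvIget dist u0 + 1 < b'
        · rw [if_pos hc, ← hfu0]; exact hub L' _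
        · rw [if_neg hc]
          exact le_trans (hub L' b') (by omega)
      · exact ih _ h'
  exact le_antisymm (hle L b hu0) (hlb L b hall hmb)

-- ---- the joint invariant of the level loop (cell level) ----
def BfInv (n t : Int) (adj : List (List Int)) (dist : List Int) (F : List Int) : Prop :=
  dist.length = (n + 1).toNat ∧
  0 ≤ t ∧
  t + (cN dist : Int) ≤ n ∧
  (∀ c : Nat, c < (n + 1).toNat → cget dist c = -1 ∨ (0 ≤ cget dist c ∧ cget dist c ≤ t)) ∧
  (∀ c : Nat, c < (n + 1).toNat → ∀ v ∈ cadj adj c, cget dist c ≠ -1 → cget dist c < t →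
      cget dist (pvEff (n + 1).toNat v) ≠ -1 ∧
      cget dist (pvEff (n + 1).toNat v) ≤ cget dist c + 1) ∧
  (∀ y ∈ F, pvEff (n + 1).toNat y < (n + 1).toNat ∧ cget dist (pvEff (n + 1).toNat y) = t) ∧
  (∀ c : Nat, c < (n + 1).toNat → cget dist c = t → ∃ y ∈ F, pvEff (n + 1).toNat y = c)

-- one level of the level loop corresponds exactly to one relaxation round on the mapped array
theorem roundAB (n t : Int) (adj : List (List Int)) (dist F : List Int) (hn : 1 ≤ n)
    (hA : AdjInv n adj) (hI : BfInv n t adj dist F) :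
    bfRound adj n (dist.map (relF (n + 1)))
      = (expandB adj (t + 1) (dist, []) F).1.map (relF (n + 1)) := by
  obtain ⟨hlen, ht0, hcnt, hRange, hEdge, hFs, hFc⟩ := hI
  obtain ⟨hAlen, hAbound, hAsym⟩ := hA
  have hflat := expandB_flat adj (t + 1) F (dist, [])
  set L := F.flatMap (fun u => pvAget adj u) with hL
  have hLb : ∀ x ∈ L, pvEff (n + 1).toNat x < (n + 1).toNat := by
    intro x hx
    rw [hL, List.mem_flatMap] at hx
    obtain ⟨u, -, hxu⟩ := hx
    rw [pvAget_eq_cadj] at hxu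
    exact hAbound _ x hxu
  obtain ⟨c1, c3, c4⟩ := expChar (n + 1).toNat (t + 1) (by omega) L dist [] hlen hLb
  have hmlen : (dist.map (relF (n + 1))).length = (n + 1).toNat := by simp [hlen]
  obtain ⟨r1, r3⟩ := roundChar adj n (dist.map (relF (n + 1))) hn hmlen
  -- the cells written this level are exactly the unvisited cells with a frontier neighbour
  have hinL : ∀ c : Nat, c < (n + 1).toNat →
      ((∃ y ∈ L, pvEff (n + 1).toNat y = c)
        ↔ ∃ v ∈ cadj adj c, cget dist (pvEff (n + 1).toNat v) = t) := by
    intro c hc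
    constructor
    · rintro ⟨y, hy, hyc⟩
      rw [hL, List.mem_flatMap] at hy
      obtain ⟨u, huF, hyu⟩ := hy
      obtain ⟨hcu, hut⟩ := hFs u huF
      rw [pvAget_eq_cadj, hAlen] at hyu
      obtain ⟨v, hv, hvc⟩ := (hAsym (pvEff (n + 1).toNat u) c hcu hc).mp ⟨y, hyu, hyc⟩
      exact ⟨v, hv, by rw [hvc]; exact hut⟩
    · rintro ⟨v, hv, hvt⟩
      have hcv : pvEff (n + 1).toNat v < (n + 1).toNat := hAbound c v hv
      obtain ⟨y, hyF, hyc⟩ := hFc (pvEff (n + 1).toNat v) hcv hvt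
      obtain ⟨z, hz, hzc⟩ := (hAsym (pvEff (n + 1).toNat v) c hcv hc).mpr ⟨v, hv, rfl⟩
      refine ⟨z, ?_, hzc⟩
      rw [hL, List.mem_flatMap]
      refine ⟨y, hyF, ?_⟩
      rw [pvAget_eq_cadj, hAlen, hyc]
      exact hz
  have hE1len : (expandB adj (t + 1) (dist, []) F).1.length = dist.length := by
    rw [hflat]; exact stepB_length _ _ _
  have hnv : ∀ u : Int, pvEff (n + 1).toNat u < (n + 1).toNat →
      pvIget (dist.map (relF (n + 1))) u = relF (n + 1) (cget dist (pvEff (n + 1).toNat u)) := by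
    intro u hu
    rw [pvIget_eq_cget, List.length_map, hlen, cget_map _ _ _ (by rw [hlen]; exact hu)]
  apply list_eq_of_cget
  · rw [r1, hmlen, List.length_map, hE1len, hlen]
  · intro c hclen
    rw [r1, hmlen] at hclen
    rw [r3 c hclen]
    have hrhs : cget ((expandB adj (t + 1) (dist, []) F).1.map (relF (n + 1))) c
        = relF (n + 1) (cget (expandB adj (t + 1) (dist, []) F).1 c) :=
      cget_map _ _ _ (by rw [hE1len, hlen]; exact hclen)
    rw [hrhs]
    have hErw : cget (expandB adj (t + 1) (dist, []) F).1 c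
        = if cget dist c = -1 ∧ (∃ y ∈ L, pvEff (n + 1).toNat y = c) then t + 1
          else cget dist c := by
      rw [hflat]; exact c1 c hclen
    have hAc : pvAget adj (c : Int) = cadj adj c := by
      rw [pvAget_eq_cadj, pvEff_natCast]
    have hinit : pvIget (dist.map (relF (n + 1))) (c : Int)
        = relF (n + 1) (cget dist c) := by
      rw [hnv (c : Int) (by rw [pvEff_natCast]; exact hclen), pvEff_natCast]
    rcases hRange c hclen with hd | ⟨hd0, hdt⟩
    · by_cases hmem : ∃ y ∈ L, pvEff (n + 1).toNat y = c
      · obtain ⟨u0, hu0, hu0t⟩ := (hinL c hclen).mp hmem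
        rw [relaxNode, hAc, hinit, hd]
        have hrelax : (cadj adj c).foldl
            (fun best u => if pvIget (dist.map (relF (n + 1))) u + 1 < best
              then pvIget (dist.map (relF (n + 1))) u + 1 else best)
            (relF (n + 1) (-1)) = t + 1 := by
          refine relax_fold_min _ _ _ _ ?_ ?_ ?_
          · intro u hu
            have hcu := hAbound c u hu
            rw [hnv u hcu]
            rcases hRange _ hcu with hdu | ⟨hdu0, hdut⟩
            · rw [hdu]; simp [relF]; omega
            · have hnd : cget dist (pvEff (n + 1).toNat u) ≠ -1 := by omega
              simp only [relF, if_neg hnd]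
              by_cases hlt : cget dist (pvEff (n + 1).toNat u) < t
              · obtain ⟨z, hz, hzc⟩ := (hAsym (pvEff (n + 1).toNat u) c hcu hclen).mpr ⟨u, hu, rfl⟩
                exact absurd ((hEdge _ hcu z hz hnd hlt).1)
                  (by rw [hzc]; simp [hd])
              · omega
          · simp [relF]; omega
          · refine ⟨u0, hu0, ?_⟩
            rw [hnv u0 (hAbound c u0 hu0), hu0t]
            simp only [relF, if_neg (by omega : ¬ t = -1)]
        rw [hrelax, hErw, if_pos ⟨hd, hmem⟩]
        simp only [relF, if_neg (by omega : ¬ t + 1 = -1)]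
      · rw [relaxNode, hAc, hinit, hd]
        have hall : ∀ u ∈ cadj adj c,
            relF (n + 1) (-1) ≤ pvIget (dist.map (relF (n + 1))) u + 1 := by
          intro u hu
          have hcu := hAbound c u hu
          rw [hnv u hcu]
          rcases hRange _ hcu with hdu | ⟨hdu0, hdut⟩
          · rw [hdu]; simp [relF]
          · have hnd : cget dist (pvEff (n + 1).toNat u) ≠ -1 := by omega
            by_cases hlt : cget dist (pvEff (n + 1).toNat u) < t
            · obtain ⟨z, hz, hzc⟩ := (hAsym (pvEff (n + 1).toNat u) c hcu hclen).mpr ⟨u, hu, rfl⟩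
              exact absurd ((hEdge _ hcu z hz hnd hlt).1)
                (by rw [hzc]; simp [hd])
            · have hdut' : cget dist (pvEff (n + 1).toNat u) = t := by omega
              exact absurd ((hinL c hclen).mpr ⟨u, hu, hdut'⟩) hmem
        rw [relax_fold_const _ _ _ hall, hErw, if_neg (fun h => hmem h.2), hd]
    · have hnd : cget dist c ≠ -1 := by omega
      rw [relaxNode, hAc, hinit]
      simp only [relF, if_neg hnd]
      have hall : ∀ u ∈ cadj adj c,
          cget dist c ≤ pvIget (dist.map (relF (n + 1))) u + 1 := by
        intro u hu
        have hcu := hAbound c u hu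
        rw [hnv u hcu]
        rcases hRange _ hcu with hdu | ⟨hdu0, hdut⟩
        · rw [hdu]; simp [relF]; omega
        · have hnd' : cget dist (pvEff (n + 1).toNat u) ≠ -1 := by omega
          simp only [relF, if_neg hnd']
          by_cases hlt : cget dist (pvEff (n + 1).toNat u) + 1 < cget dist c
          · have hltt : cget dist (pvEff (n + 1).toNat u) < t := by omega
            obtain ⟨z, hz, hzc⟩ := (hAsym (pvEff (n + 1).toNat u) c hcu hclen).mpr ⟨u, hu, rfl⟩
            have := (hEdge _ hcu z hz hnd' hltt).2
            rw [hzc] at this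
            omega
          · omega
      rw [relax_fold_const _ _ _ hall, hErw,
        if_neg (show ¬(cget dist c = -1 ∧ ∃ y ∈ L, pvEff (n + 1).toNat y = c)
          from fun h => hnd h.1)]
      simp only [relF, if_neg hnd]

theorem roundInv (n t : Int) (adj : List (List Int)) (dist F : List Int) (_hn : 1 ≤ n)
    (hA : AdjInv n adj) (hI : BfInv n t adj dist F) :
    ((expandB adj (t + 1) (dist, []) F).2 ≠ [] →
        BfInv n (t + 1) adj (expandB adj (t + 1) (dist, []) F).1
          (expandB adj (t + 1) (dist, []) F).2) ∧
    cN (expandB adj (t + 1) (dist, []) F).1 + (expandB adj (t + 1) (dist, []) F).2.length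
      = cN dist ∧
    ((expandB adj (t + 1) (dist, []) F).2 = [] → (expandB adj (t + 1) (dist, []) F).1 = dist) ∧
    (∀ v ∈ (expandB adj (t + 1) (dist, []) F).2,
        pvEff (n + 1).toNat v < (n + 1).toNat ∧
        cget dist (pvEff (n + 1).toNat v) = -1 ∧
        cget (expandB adj (t + 1) (dist, []) F).1 (pvEff (n + 1).toNat v) = t + 1) := by
  obtain ⟨hlen, ht0, hcnt, hRange, hEdge, hFs, hFc⟩ := hI
  obtain ⟨hAlen, hAbound, hAsym⟩ := hA
  have hflat := expandB_flat adj (t + 1) F (dist, [])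
  set L := F.flatMap (fun u => pvAget adj u) with hL
  have hLb : ∀ x ∈ L, pvEff (n + 1).toNat x < (n + 1).toNat := by
    intro x hx
    rw [hL, List.mem_flatMap] at hx
    obtain ⟨u, -, hxu⟩ := hx
    rw [pvAget_eq_cadj] at hxu
    exact hAbound _ x hxu
  obtain ⟨c1, c3, c4⟩ := expChar (n + 1).toNat (t + 1) (by omega) L dist [] hlen hLb
  have hErw1 : ∀ c : Nat, c < (n + 1).toNat →
      cget (expandB adj (t + 1) (dist, []) F).1 c
        = if cget dist c = -1 ∧ (∃ y ∈ L, pvEff (n + 1).toNat y = c) then t + 1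
          else cget dist c := by
    intro c hc; rw [hflat]; exact c1 c hc
  have hEmem : ∀ c : Nat, c < (n + 1).toNat →
      ((∃ y ∈ (expandB adj (t + 1) (dist, []) F).2, pvEff (n + 1).toNat y = c)
        ↔ cget dist c = -1 ∧ ∃ y ∈ L, pvEff (n + 1).toNat y = c) := by
    intro c hc
    rw [hflat, c4 c hc]
    simp
  have hE2cn : cN (expandB adj (t + 1) (dist, []) F).1
      + (expandB adj (t + 1) (dist, []) F).2.length = cN dist := by
    rw [hflat]
    have := stepB_count (t + 1) (by omega) L (dist, [])
    simpa using this
  have hElen : (expandB adj (t + 1) (dist, []) F).1.length = dist.length := by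
    rw [hflat]; exact stepB_length _ _ _
  have hmemdesc : ∀ v ∈ (expandB adj (t + 1) (dist, []) F).2,
      pvEff (n + 1).toNat v < (n + 1).toNat ∧
      cget dist (pvEff (n + 1).toNat v) = -1 ∧
      cget (expandB adj (t + 1) (dist, []) F).1 (pvEff (n + 1).toNat v) = t + 1 := by
    intro v hv
    have hvL : v ∈ L := by
      have := c3 v (by rw [hflat] at hv; exact hv)
      rcases this with h | h
      · simp at h
      · exact h
    have hcv : pvEff (n + 1).toNat v < (n + 1).toNat := hLb v hvL
    have hvd : cget dist (pvEff (n + 1).toNat v) = -1 :=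
      ((hEmem _ hcv).mp ⟨v, hv, rfl⟩).1
    exact ⟨hcv, hvd, by rw [hErw1 _ hcv, if_pos ⟨hvd, v, hvL, rfl⟩]⟩
  refine ⟨?_, hE2cn, ?_, hmemdesc⟩
  · intro hne
    have hlenpos : 1 ≤ (expandB adj (t + 1) (dist, []) F).2.length :=
      List.length_pos_iff.mpr hne
    refine ⟨by rw [hElen, hlen], by omega, by omega, ?_, ?_, ?_, ?_⟩
    · intro c hc
      rw [hErw1 c hc]
      by_cases hcond : cget dist c = -1 ∧ ∃ y ∈ L, pvEff (n + 1).toNat y = c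
      · rw [if_pos hcond]; right; omega
      · rw [if_neg hcond]
        rcases hRange c hc with h | ⟨h, h'⟩
        · exact Or.inl h
        · exact Or.inr ⟨h, by omega⟩
    · intro c hc v hv hne1 hlt
      have hcv : pvEff (n + 1).toNat v < (n + 1).toNat := hAbound c v hv
      rw [hErw1 c hc] at hne1 hlt
      rw [hErw1 c hc, hErw1 _ hcv]
      by_cases hcu : cget dist c = -1 ∧ ∃ y ∈ L, pvEff (n + 1).toNat y = c
      · rw [if_pos hcu] at hlt
        exact absurd hlt (by omega)
      · rw [if_neg hcu] at hne1 hlt ⊢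
        by_cases hltt : cget dist c < t
        · obtain ⟨hv_ne, hv_le⟩ := hEdge c hc v hv hne1 hltt
          rw [if_neg (fun h => hv_ne h.1)]
          exact ⟨hv_ne, by omega⟩
        · have hdu : cget dist c = t := by
            rcases hRange c hc with h | ⟨h, h'⟩
            · exact absurd h hne1
            · omega
          obtain ⟨y, hyF, hyc⟩ := hFc c hc hdu
          have hvL : v ∈ L := by
            rw [hL, List.mem_flatMap]
            refine ⟨y, hyF, ?_⟩
            rw [pvAget_eq_cadj, hAlen, hyc]
            exact hv
          by_cases hcvd : cget dist (pvEff (n + 1).toNat v) = -1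
          · rw [if_pos ⟨hcvd, v, hvL, rfl⟩]
            exact ⟨by omega, by omega⟩
          · rw [if_neg (fun h => hcvd h.1)]
            rcases hRange _ hcv with h | ⟨h, h'⟩
            · exact absurd h hcvd
            · exact ⟨hcvd, by omega⟩
    · intro v hv
      obtain ⟨a, b, c⟩ := hmemdesc v hv
      exact ⟨a, c⟩
    · intro c hc hx
      rw [hErw1 c hc] at hx
      by_cases hcond : cget dist c = -1 ∧ ∃ y ∈ L, pvEff (n + 1).toNat y = c
      · exact (hEmem c hc).mpr hcond
      · rw [if_neg hcond] at hx
        rcases hRange c hc with h | ⟨h, h'⟩ <;> omega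
  · intro h2
    refine list_eq_of_cget _ _ hElen ?_
    intro c hclen
    rw [hElen, hlen] at hclen
    rw [hErw1 c hclen]
    by_cases hcond : cget dist c = -1 ∧ ∃ y ∈ L, pvEff (n + 1).toNat y = c
    · obtain ⟨y, hy, -⟩ := ((hEmem c hclen).mpr hcond)
      rw [h2] at hy
      simp at hy
    · rw [if_neg hcond]

-- ---- the second bridge: the level loop = relaxation rounds with early exit ----
theorem mainAB (n : Int) (adj : List (List Int)) (hn : 1 ≤ n) (hA : AdjInv n adj) :
    ∀ (r : Nat) (fuel : Nat) (t : Int) (dist F : List Int),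
    BfInv n t adj dist F → cN dist ≤ r → r + 1 ≤ fuel →
    (levelLoopB adj fuel t dist F).map (relF (n + 1)) = bfRun adj n r (dist.map (relF (n + 1))) ∧
    (∀ c : Nat, c < (n + 1).toNat →
        cget (levelLoopB adj fuel t dist F) c = -1 ∨
        (0 ≤ cget (levelLoopB adj fuel t dist F) c ∧
          cget (levelLoopB adj fuel t dist F) c ≤ n)) := by
  intro r
  induction r with
  | zero =>
    intro fuel t dist F hI hcn hfuel
    have hI2 := hI
    obtain ⟨hlen, ht0, hcnt, hRange, hEdge0, hFs0, hFc0⟩ := hI2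
    have hRange' : ∀ c : Nat, c < (n + 1).toNat →
        cget dist c = -1 ∨ (0 ≤ cget dist c ∧ cget dist c ≤ n) := by
      intro c hc
      rcases hRange c hc with h | ⟨h, h'⟩
      · exact Or.inl h
      · exact Or.inr ⟨h, by omega⟩
    obtain ⟨fuel', rfl⟩ : ∃ f', fuel = f' + 1 := ⟨fuel - 1, by omega⟩
    match F with
    | [] =>
      rw [levelLoopB_nil]
      exact ⟨rfl, hRange'⟩
    | u :: fr =>
      obtain ⟨-, hcneq, hnil, -⟩ := roundInv n t adj dist (u :: fr) hn hA hI
      have hE2 : (expandB adj (t + 1) (dist, []) (u :: fr)).2 = [] := by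
        rcases hx : (expandB adj (t + 1) (dist, []) (u :: fr)).2 with _ | ⟨y, ys⟩
        · rfl
        · rw [hx] at hcneq
          simp only [List.length_cons] at hcneq
          omega
      have hEd := hnil hE2
      have hunf : levelLoopB adj (fuel' + 1) t dist (u :: fr)
          = levelLoopB adj fuel' (t + 1) (expandB adj (t + 1) (dist, []) (u :: fr)).1
              (expandB adj (t + 1) (dist, []) (u :: fr)).2 := rfl
      rw [hunf, hE2, hEd, levelLoopB_nil]
      exact ⟨rfl, hRange'⟩
  | succ r ih =>
    intro fuel t dist F hI hcn hfuel
    obtain ⟨fuel', rfl⟩ : ∃ f', fuel = f' + 1 := ⟨fuel - 1, by omega⟩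
    have hI' := hI
    obtain ⟨hlen, ht0, hcnt, hRange, hEdge, hFs, hFc⟩ := hI'
    have hRange' : ∀ c : Nat, c < (n + 1).toNat →
        cget dist c = -1 ∨ (0 ≤ cget dist c ∧ cget dist c ≤ n) := by
      intro c hc
      rcases hRange c hc with h | ⟨h, h'⟩
      · exact Or.inl h
      · exact Or.inr ⟨h, by omega⟩
    match F with
    | [] =>
      rw [levelLoopB_nil]
      have hround := roundAB n t adj dist [] hn hA hI
      have hexp : expandB adj (t + 1) (dist, []) [] = (dist, []) := rfl
      rw [hexp] at hround
      refine ⟨?_, hRange'⟩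
      have hrun : bfRun adj n (r + 1) (dist.map (relF (n + 1)))
          = if bfRound adj n (dist.map (relF (n + 1))) = dist.map (relF (n + 1))
            then dist.map (relF (n + 1))
            else bfRun adj n r (bfRound adj n (dist.map (relF (n + 1)))) := rfl
      rw [hrun, if_pos hround]
    | u :: fr =>
      have hunf : levelLoopB adj (fuel' + 1) t dist (u :: fr)
          = levelLoopB adj fuel' (t + 1) (expandB adj (t + 1) (dist, []) (u :: fr)).1
              (expandB adj (t + 1) (dist, []) (u :: fr)).2 := rfl
      have hround := roundAB n t adj dist (u :: fr) hn hA hI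
      obtain ⟨hInv', hcneq, hnil, hdesc⟩ := roundInv n t adj dist (u :: fr) hn hA hI
      have hrun : bfRun adj n (r + 1) (dist.map (relF (n + 1)))
          = if bfRound adj n (dist.map (relF (n + 1))) = dist.map (relF (n + 1))
            then dist.map (relF (n + 1))
            else bfRun adj n r (bfRound adj n (dist.map (relF (n + 1)))) := rfl
      by_cases hE2 : (expandB adj (t + 1) (dist, []) (u :: fr)).2 = []
      · have hEd := hnil hE2
        rw [hunf, hE2, hEd, levelLoopB_nil]
        rw [hEd] at hround
        exact ⟨by rw [hrun, if_pos hround], hRange'⟩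
      · have hInv'' := hInv' hE2
        have hlp : 1 ≤ (expandB adj (t + 1) (dist, []) (u :: fr)).2.length :=
          List.length_pos_iff.mpr hE2
        have hElen : (expandB adj (t + 1) (dist, []) (u :: fr)).1.length = dist.length := by
          rw [expandB_flat]; exact stepB_length _ _ _
        have hne : bfRound adj n (dist.map (relF (n + 1))) ≠ dist.map (relF (n + 1)) := by
          intro heq
          obtain ⟨v, hv⟩ := List.exists_mem_of_ne_nil _ hE2
          obtain ⟨hcv, hvd, hvE⟩ := hdesc v hv
          have hcn1 : 1 ≤ cN dist := cN_pos_cell dist _ (by rw [hlen]; exact hcv) hvd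
          have h1 : cget (bfRound adj n (dist.map (relF (n + 1)))) (pvEff (n + 1).toNat v)
              = relF (n + 1) (t + 1) := by
            rw [hround, cget_map _ _ _ (by rw [hElen, hlen]; exact hcv), hvE]
          have h2 : cget (dist.map (relF (n + 1))) (pvEff (n + 1).toNat v) = n + 1 := by
            rw [cget_map _ _ _ (by rw [hlen]; exact hcv), hvd]
            simp [relF]
          rw [heq, h2] at h1
          simp only [relF, if_neg (by omega : ¬ t + 1 = -1)] at h1
          omega
        have hih := ih fuel' (t + 1) (expandB adj (t + 1) (dist, []) (u :: fr)).1
          (expandB adj (t + 1) (dist, []) (u :: fr)).2 hInv'' (by omega) (by omega)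
        rw [hunf, hrun, if_neg hne, hround]
        exact hih

-- ---- aggregation: A's max-with-(-1) scan = B's INF-skipping scan ----
theorem pvIget_mem (md : List Int) (i : Int) (h : pvEff md.length i < md.length) :
    pvIget md i ∈ md := by
  rw [pvIget, List.getD, List.getElem?_eq_getElem h, Option.getD_some]
  exact List.getElem_mem h

theorem pvIget_out (md : List Int) (i : Int) (h : ¬ pvEff md.length i < md.length) :
    pvIget md i = -2 := by
  rw [pvIget, List.getD, List.getElem?_eq_none (by omega)]
  rfl

theorem pvIset_self (md : List Int) (i : Int) (h : pvEff md.length i < md.length) :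
    pvIset md i (pvIget md i) = md := by
  rw [pvIget, pvIset, List.getD, List.getElem?_eq_getElem h, Option.getD_some]
  exact List.set_getElem_self h

theorem foldl_congr_inv (f g : List Int → Int → List Int) :
    ∀ (l : List Int) (P : List Int → Prop) (md : List Int), P md →
    (∀ x ∈ l, ∀ md', P md' → f md' x = g md' x ∧ P (f md' x)) →
    l.foldl f md = l.foldl g md := by
  intro l P
  induction l with
  | nil => intros; rfl
  | cons a l ih =>
    intro md hP hstep
    simp only [List.foldl_cons]
    obtain ⟨heq, hP'⟩ := hstep a (by simp) md hP
    rw [← heq]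
    exact ih _ hP' (fun x hx md' h => hstep x (by simp [hx]) md' h)

theorem aggEq (n k : Int) (pts distA : List Int) (hn : 1 ≤ n)
    (hlen : distA.length = (n + 1).toNat)
    (hRange : ∀ c : Nat, c < (n + 1).toNat →
        cget distA c = -1 ∨ (0 ≤ cget distA c ∧ cget distA c ≤ n)) :
    ∀ (l : List Int), (∀ x ∈ l, 1 ≤ x ∧ x ≤ n) → ∀ (md : List Int), (∀ e ∈ md, 0 ≤ e) →
    l.foldl (fun md i =>
        let pt := pvIget pts (i - 1)
        pvIset md (pt - 1) (max (pvIget md (pt - 1)) (pvIget distA i))) md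
      = l.foldl (fun md v =>
          let d := pvIget (distA.map (relF (n + 1))) v
          if d < n + 1 then
            let pt := pvIget pts (v - 1)
            if d > pvIget md (pt - 1) then pvIset md (pt - 1) d else md
          else md) md := by
  have hstep : ∀ x : Int, 1 ≤ x → x ≤ n → ∀ md : List Int, (∀ e ∈ md, 0 ≤ e) →
      pvIset md (pvIget pts (x - 1) - 1)
          (max (pvIget md (pvIget pts (x - 1) - 1)) (pvIget distA x))
        = (if pvIget (distA.map (relF (n + 1))) x < n + 1 then
            if pvIget (distA.map (relF (n + 1))) x > pvIget md (pvIget pts (x - 1) - 1) then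
              pvIset md (pvIget pts (x - 1) - 1) (pvIget (distA.map (relF (n + 1))) x)
            else md
          else md) ∧
      (∀ e ∈ pvIset md (pvIget pts (x - 1) - 1)
          (max (pvIget md (pvIget pts (x - 1) - 1)) (pvIget distA x)), 0 ≤ e) := by
    intro x hx1 hx2 md hmd
    have hcx : x.toNat < (n + 1).toNat := by omega
    have hgx : pvIget distA x = cget distA x.toNat := by
      rw [pvIget_eq_cget, hlen, pvEff_of_nonneg _ _ (by omega)]
    have hdB : pvIget (distA.map (relF (n + 1))) x = relF (n + 1) (cget distA x.toNat) := by
      rw [pvIget_eq_cget, List.length_map, hlen, pvEff_of_nonneg _ _ (by omega),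
        cget_map _ _ _ (by rw [hlen]; exact hcx)]
    have hrn : relF (n + 1) (-1) = n + 1 := by simp [relF]
    set idx := pvIget pts (x - 1) - 1 with hidx
    by_cases hlt : pvEff md.length idx < md.length
    · have he0 : 0 ≤ pvIget md idx := hmd _ (pvIget_mem md idx hlt)
      rcases hRange x.toNat hcx with hd | ⟨hd0, hd1⟩
      · rw [hgx, hd, hdB, hd, hrn, max_eq_left (by omega), pvIset_self md idx hlt]
        exact ⟨by rw [if_neg (lt_irrefl (n + 1))], hmd⟩
      · have hne : cget distA x.toNat ≠ -1 := by omega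
        rw [hgx, hdB]
        simp only [relF, if_neg hne]
        rw [if_pos (by omega : cget distA x.toNat < n + 1)]
        by_cases hgt : cget distA x.toNat > pvIget md idx
        · rw [if_pos hgt, max_eq_right (by omega)]
          refine ⟨rfl, ?_⟩
          intro e he
          rcases List.mem_or_eq_of_mem_set he with h | h
          · exact hmd e h
          · omega
        · rw [if_neg hgt, max_eq_left (by omega), pvIset_self md idx hlt]
          exact ⟨rfl, hmd⟩
    · have hsetx : ∀ v : Int, pvIset md idx v = md :=
        fun v => List.set_eq_of_length_le (by omega)
      have he2 : pvIget md idx = -2 := pvIget_out md idx hlt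
      rcases hRange x.toNat hcx with hd | ⟨hd0, hd1⟩
      · rw [hgx, hd, hdB, hd, hrn, hsetx]
        exact ⟨by rw [if_neg (lt_irrefl (n + 1))], hmd⟩
      · have hne : cget distA x.toNat ≠ -1 := by omega
        rw [hgx, hdB]
        simp only [relF, if_neg hne]
        rw [if_pos (by omega : cget distA x.toNat < n + 1), he2,
          if_pos (by omega : cget distA x.toNat > -2), hsetx, hsetx]
        exact ⟨rfl, hmd⟩
  intro l hb md hmd
  refine foldl_congr_inv _ _ l (fun md => ∀ e ∈ md, 0 ≤ e) md hmd ?_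
  intro x hx md' hP
  exact hstep x (hb x hx).1 (hb x hx).2 md' hP

-- ===== VERDICT (by name: the statement is the Claim_ definition above) =====
theorem solve_spec : Claim_equal_solve := by
  intro n m k pts roads hdom hpre
  obtain ⟨hn, hplen, hpt, hroads⟩ := hpre
  show solve n m k pts roads = solve_alt n m k pts roads
  simp only [solve, solve_alt]
  have hA := buildAdj_inv n roads hn hroads
  set adj := buildAdj n roads with hadj
  set dist0 := pvIset (List.replicate (n + 1).toNat (-1)) 1 0 with hdist0
  have hd0len : dist0.length = (n + 1).toNat := by
    rw [hdist0, length_pvIset, List.length_replicate]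
  have hrep1 : pvEff (List.replicate (n + 1).toNat (-1 : Int)).length 1 = 1 := by
    rw [List.length_replicate, pvEff_of_nonneg _ _ (by omega)]
    rfl
  have hcget1 : cget dist0 1 = 0 := by
    rw [hdist0]
    have := cget_pvIset_self (List.replicate (n + 1).toNat (-1)) 1 0
      (by rw [hrep1, List.length_replicate]; omega)
    rw [hrep1] at this
    exact this
  have hcgetO : ∀ c : Nat, c < (n + 1).toNat → c ≠ 1 → cget dist0 c = -1 := by
    intro c hc hc1
    rw [hdist0, cget_pvIset_ne _ _ _ _ (by rw [hrep1]; exact fun h => hc1 h.symm),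
      cget_eq_getElem _ _ (by rw [List.length_replicate]; exact hc)]
    exact List.getElem_replicate _
  have hget1 : pvIget dist0 1 = 0 := by
    rw [pvIget_eq_cget, hd0len, show pvEff (n + 1).toNat 1 = 1 from by
      rw [pvEff_of_nonneg _ _ (by omega)]; rfl]
    exact hcget1
  have hrepget1 : pvIget (List.replicate (n + 1).toNat (-1 : Int)) 1 = -1 := by
    rw [pvIget_eq_cget, hrep1,
      cget_eq_getElem _ _ (by rw [List.length_replicate]; omega)]
    exact List.getElem_replicate _
  have hcNrep : cN (List.replicate (n + 1).toNat (-1 : Int)) = (n + 1).toNat := by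
    simp [cN, List.countP_replicate]
  have hcN0 : cN dist0 = n.toNat := by
    have h := cN_pvIset (List.replicate (n + 1).toNat (-1)) 1 0 hrepget1 (by omega)
    rw [← hdist0] at h
    omega
  have hlb0 : ∀ x ∈ dist0, -1 ≤ x := by
    intro x hx
    rw [hdist0, pvIset] at hx
    rcases List.mem_or_eq_of_mem_set hx with h | h
    · rw [List.eq_of_mem_replicate h]
    · omega
  have hbridge : bfsLoopA adj (dist0.length + 1) dist0 [1]
      = levelLoopB adj (dist0.length + 1) 0 dist0 [1] := by
    refine bridge adj (dist0.length + 1) (dist0.length + 1) 0 dist0 [1]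
      ⟨hlb0, ?_, le_refl 0⟩ ?_ ?_
    · intro u hu
      rw [List.mem_singleton] at hu
      subst hu
      exact hget1
    · have := List.countP_le_length (l := dist0) (p := fun x => x == -1)
      simp only [List.length_cons, List.length_nil, cN] at *
      omega
    · have := List.countP_le_length (l := dist0) (p := fun x => x == -1)
      simp only [cN] at *
      omega
  have heff11 : pvEff (n + 1).toNat (1 : Int) = 1 := by
    rw [pvEff_of_nonneg _ _ (by omega)]
    rfl
  have hInv0 : BfInv n 0 adj dist0 [1] := by
    refine ⟨hd0len, le_refl 0, ?_, ?_, ?_, ?_, ?_⟩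
    · rw [hcN0]; omega
    · intro c hc
      by_cases hc1 : c = 1
      · subst hc1; rw [hcget1]; right; omega
      · rw [hcgetO c hc hc1]; left; rfl
    · intro c hc v hv hne hlt
      by_cases hc1 : c = 1
      · subst hc1; rw [hcget1] at hlt; omega
      · rw [hcgetO c hc hc1] at hne; omega
    · intro y hy
      rw [List.mem_singleton] at hy
      subst hy
      rw [heff11]
      exact ⟨by omega, hcget1⟩
    · intro c hc hcv
      by_cases hc1 : c = 1
      · subst hc1
        exact ⟨1, by simp, heff11⟩
      · rw [hcgetO c hc hc1] at hcv; omega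
  obtain ⟨hmapEq, hRangeF⟩ := mainAB n adj hn hA n.toNat (dist0.length + 1) 0 dist0 [1]
    hInv0 (by omega) (by omega)
  have hmap0 : dist0.map (relF (n + 1)) = pvIset (List.replicate (n + 1).toNat (n + 1)) 1 0 := by
    rw [hdist0, pvIset, pvIset, List.map_set, List.map_replicate]
    have e1 : relF (n + 1) 0 = 0 := by simp [relF]
    have e2 : relF (n + 1) (-1) = n + 1 := by simp [relF]
    rw [e1, e2, hrep1]
    have h3 : pvEff (List.replicate (n + 1).toNat ((n : Int) + 1)).length 1 = 1 := by
      rw [List.length_replicate, pvEff_of_nonneg _ _ (by omega)]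
      rfl
    rw [h3]
  have hfinal : bfRun adj n n.toNat (pvIset (List.replicate (n + 1).toNat (n + 1)) 1 0)
      = (levelLoopB adj (dist0.length + 1) 0 dist0 [1]).map (relF (n + 1)) := by
    rw [← hmap0, hmapEq]
  rw [hbridge, hfinal]
  refine aggEq n k pts (levelLoopB adj (dist0.length + 1) 0 dist0 [1]) hn
    (by rw [levelLoopB_length, hd0len]) hRangeF (PySem.List.pyRange 1 (n + 1) 1)
    (fun x hx => by rw [PySem.List.mem_pyRange_one] at hx; omega)
    (List.replicate k.toNat 0) ?_
  intro e he
  rw [List.eq_of_mem_replicate he]
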